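-- pv_equiv track=rewrite | github.com/robinng668/ROBIN-COM-Website | 网站对比脚本.py | analyze_colors
-- ===== SOURCE A (Python) =====
-- from typing import Dict, List, Tuple, Optional
--
-- def analyze_colors(html: str) -> Dict[str, any]:
--     """分析网页配色方案"""
--     colors = {
--         'dark_blue': 0,      # #1a237e, #0d1b2a 等深蓝色
--         'gold': 0,           # #d4af37, #c9a227 等金色
--         'light_blue': 0,     # #00d4ff, #4fc3f7 等浅蓝色
--         'white': 0,          # 白色
--         'black': 0,           # 黑色
--         'gradient': 0,       # 渐变背景
--         'total': 0
--     }
--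
--     # 统计颜色出现次数
--     html_lower = html.lower()
--
--     # 深蓝色检测
--     dark_blue_patterns = ['#1a237e', '#0d1b2a', '#1b2838', '#0a1929', '#0f1419', 'rgb(26,35,126)', 'rgb(13,27,42)']
--     for pattern in dark_blue_patterns:
--         colors['dark_blue'] += html_lower.count(pattern)
--
--     # 金色检测
--     gold_patterns = ['#d4af37', '#c9a227', '#b8860b', '#ffd700', '#ffb400', 'rgb(212,175,55)']
--     for pattern in gold_patterns:
--         colors['gold'] += html_lower.count(pattern)
--
--     # 浅蓝色检测(非专业配色)
--     light_blue_patterns = ['#00d4ff', '#00bcd4', '#4fc3f7', '#29b6f6', 'rgb(0,212,255)']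
--     for pattern in light_blue_patterns:
--         colors['light_blue'] += html_lower.count(pattern)
--
--     # 渐变背景
--     if 'gradient' in html_lower:
--         colors['gradient'] = 1
--
--     colors['total'] = len(html)
--
--     return colors
-- ===== SOURCE B (Python) =====
-- # Single left-to-right scan that classifies a match at each position, instead of 18 independent .count() passes.
-- DARK_BLUE_PATTERNS = ['#1a237e', '#0d1b2a', '#1b2838', '#0a1929', '#0f1419', 'rgb(26,35,126)', 'rgb(13,27,42)']
-- GOLD_PATTERNS = ['#d4af37', '#c9a227', '#b8860b', '#ffd700', '#ffb400', 'rgb(212,175,55)']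
-- LIGHT_BLUE_PATTERNS = ['#00d4ff', '#00bcd4', '#4fc3f7', '#29b6f6', 'rgb(0,212,255)']
--
-- def analyze_colors(html: str):
--     h = html.lower()
--     dark = gold = light = 0
--     for i in range(len(h)):
--         if any(h.startswith(p, i) for p in DARK_BLUE_PATTERNS):
--             dark += 1
--         if any(h.startswith(p, i) for p in GOLD_PATTERNS):
--             gold += 1
--         if any(h.startswith(p, i) for p in LIGHT_BLUE_PATTERNS):
--             light += 1
--     return {
--         'dark_blue': dark,
--         'gold': gold,
--         'light_blue': light,
--         'white': 0,
--         'black': 0,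
--         'gradient': 1 if 'gradient' in h else 0,
--         'total': len(html),
--     }
-- ===== Notes on version B (the rewrite author's own statement) =====
-- stated objective: alternative
-- what changed: Replaces the 18 independent html_lower.count(pattern) passes with a single left-to-right scan that tests at each position which category's pattern starts there, accumulating three counters; the dict is then built as one literal.
import Mathlib
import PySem

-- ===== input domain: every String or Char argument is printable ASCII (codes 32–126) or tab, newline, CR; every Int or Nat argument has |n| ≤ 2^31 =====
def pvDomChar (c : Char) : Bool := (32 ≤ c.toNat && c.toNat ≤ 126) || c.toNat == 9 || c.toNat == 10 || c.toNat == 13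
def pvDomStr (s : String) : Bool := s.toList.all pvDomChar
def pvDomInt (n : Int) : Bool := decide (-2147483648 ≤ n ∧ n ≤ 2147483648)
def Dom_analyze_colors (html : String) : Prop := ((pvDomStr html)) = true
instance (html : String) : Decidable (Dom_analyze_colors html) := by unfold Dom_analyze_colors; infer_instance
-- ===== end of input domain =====

-- B replaces A's 18 independent substring-count passes by ONE left-to-right scan of the lowered
-- string that classifies the pattern (if any) starting at each position (objective: alternative).

-- ===== PORT A =====
def darkBluePatterns : List String :=
  ["#1a237e", "#0d1b2a", "#1b2838", "#0a1929", "#0f1419", "rgb(26,35,126)", "rgb(13,27,42)"]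
def goldPatterns : List String :=
  ["#d4af37", "#c9a227", "#b8860b", "#ffd700", "#ffb400", "rgb(212,175,55)"]
def lightBluePatterns : List String :=
  ["#00d4ff", "#00bcd4", "#4fc3f7", "#29b6f6", "rgb(0,212,255)"]

def analyze_colors (html : String) : List (String × Int) :=
  let colors : PySem.Dict String Int :=
    PySem.Dict.ofList [("dark_blue", 0), ("gold", 0), ("light_blue", 0), ("white", 0),
                       ("black", 0), ("gradient", 0), ("total", 0)]
  let html_lower := PySem.Str.lower html
  let colors := darkBluePatterns.foldl
    (fun d p => d.modify "dark_blue" 0 (fun v => v + (PySem.Str.count html_lower p : Int))) colors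
  let colors := goldPatterns.foldl
    (fun d p => d.modify "gold" 0 (fun v => v + (PySem.Str.count html_lower p : Int))) colors
  let colors := lightBluePatterns.foldl
    (fun d p => d.modify "light_blue" 0 (fun v => v + (PySem.Str.count html_lower p : Int))) colors
  let colors := if PySem.Str.isIn "gradient" html_lower then colors.insert "gradient" 1 else colors
  let colors := colors.insert "total" (PySem.Str.len html)
  colors.items

-- ===== PORT B =====
def pvDarkC : List (List Char) :=
  ["#1a237e".toList, "#0d1b2a".toList, "#1b2838".toList, "#0a1929".toList, "#0f1419".toList,
   "rgb(26,35,126)".toList, "rgb(13,27,42)".toList]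
def pvGoldC : List (List Char) :=
  ["#d4af37".toList, "#c9a227".toList, "#b8860b".toList, "#ffd700".toList, "#ffb400".toList,
   "rgb(212,175,55)".toList]
def pvLightC : List (List Char) :=
  ["#00d4ff".toList, "#00bcd4".toList, "#4fc3f7".toList, "#29b6f6".toList, "rgb(0,212,255)".toList]

-- 'any(h.startswith(p, i) for p in PATS)' tested at the suffix of h starting at i
def pvHit (pats : List (List Char)) (l : List Char) : Bool :=
  pats.any (fun p => PySem.Chars.startswith l p)

-- the forward 'for i in range(len(h))' loop with the three counters, walking the suffixes of h
def pvScan : List Char → Int → Int → Int → Int × Int × Int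
  | [], d, g, b => (d, g, b)
  | c :: t, d, g, b =>
      pvScan t (d + (if pvHit pvDarkC (c :: t) then 1 else 0))
               (g + (if pvHit pvGoldC (c :: t) then 1 else 0))
               (b + (if pvHit pvLightC (c :: t) then 1 else 0))

def analyze_colors_alt (html : String) : List (String × Int) :=
  let h := PySem.Str.lower html
  let r := pvScan h.toList 0 0 0
  [("dark_blue", r.1), ("gold", r.2.1), ("light_blue", r.2.2),
   ("white", 0), ("black", 0),
   ("gradient", if PySem.Str.isIn "gradient" h then 1 else 0),
   ("total", PySem.Str.len html)]

-- ===== PRECONDITION & SPEC =====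
def Spec_analyze_colors (html : String) (out : List (String × Int)) : Prop := out = analyze_colors_alt html
instance (html : String) (out : List (String × Int)) : Decidable (Spec_analyze_colors html out) := by unfold Spec_analyze_colors; infer_instance

-- ===== CLAIM (what is proved, stated in full; the proofs are below) =====
def Claim_equal_analyze_colors : Prop := ∀ (html : String), Dom_analyze_colors html → Spec_analyze_colors html (analyze_colors html)

-- ===== LEMMAS AND PROOFS =====

-- occurrences of p starting at ANY position of l (overlapping occurrences allowed)
def pvOcc (p : List Char) : List Char → Nat
  | [] => 0
  | c :: t => (if p.isPrefixOf (c :: t) then 1 else 0) + pvOcc p t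

-- p cannot overlap itself: no proper suffix of p restarts p
def pvNoSelf (p : List Char) : Bool :=
  (List.range p.length).all (fun i => i == 0 || !((p.drop i).isPrefixOf p))

def pvSum (pats : List (List Char)) (l : List Char) : Int :=
  (pats.map (fun p => (pvOcc p l : Int))).sum

theorem pvOcc_cons (p : List Char) (c : Char) (t : List Char) :
    pvOcc p (c :: t) = (if p.isPrefixOf (c :: t) then 1 else 0) + pvOcc p t := rfl

theorem pvOcc_drop_succ (p : List Char) {l : List Char} {j : Nat} (hj : j < l.length) :
    pvOcc p (l.drop j) = (if p.isPrefixOf (l.drop j) then 1 else 0) + pvOcc p (l.drop (j + 1)) := by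
  rw [List.drop_eq_getElem_cons hj, pvOcc_cons]

theorem pv_no_restart {p l : List Char} (hp : p <+: l) (hs : pvNoSelf p = true)
    {i : Nat} (h0 : 0 < i) (hi : i < p.length) : ¬ p <+: l.drop i := by
  intro hq
  obtain ⟨r, rfl⟩ := hp
  rw [List.drop_append_of_le_length (le_of_lt hi)] at hq
  have h2 : p.drop i <+: p :=
    List.prefix_of_prefix_length_le (List.prefix_append _ _) hq (by simp)
  have hall := (List.all_eq_true.mp hs) i (by simpa using hi)
  simp only [Bool.or_eq_true, beq_iff_eq, Bool.not_eq_true'] at hall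
  rcases hall with h | h
  · omega
  · exact absurd (List.isPrefixOf_iff_prefix.mpr h2) (by simp [h])

theorem pvOcc_skip {p l : List Char} (hne : p ≠ []) (hs : pvNoSelf p = true) (hp : p <+: l) :
    pvOcc p l = 1 + pvOcc p (l.drop p.length) := by
  have hlen : p.length ≤ l.length := hp.length_le
  have hpos : 0 < p.length := List.length_pos_iff.mpr hne
  have key : ∀ m, m ≤ p.length - 1 →
      pvOcc p (l.drop (p.length - m)) = pvOcc p (l.drop p.length) := by
    intro m
    induction m with
    | zero => intro _; simp
    | succ m ih =>
      intro hm
      have hj : p.length - (m + 1) < p.length := by omega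
      have hjl : p.length - (m + 1) < l.length := by omega
      rw [pvOcc_drop_succ p hjl]
      have hnp : ¬ p.isPrefixOf (l.drop (p.length - (m + 1))) := by
        rw [List.isPrefixOf_iff_prefix]
        exact pv_no_restart hp hs (by omega) hj
      rw [if_neg hnp]
      have he : p.length - (m + 1) + 1 = p.length - m := by omega
      rw [he]
      simpa using ih (by omega)
  cases l with
  | nil => exact absurd (List.prefix_nil.mp hp) hne
  | cons c t =>
    rw [pvOcc_cons, if_pos (List.isPrefixOf_iff_prefix.mpr hp)]
    have h1 := key (p.length - 1) le_rfl
    have he : p.length - (p.length - 1) = 1 := by omega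
    rw [he] at h1
    simpa using h1

theorem pv_count_go {p : List Char} (hne : p ≠ []) (hs : pvNoSelf p = true) :
    ∀ (fuel : Nat) (l : List Char) (acc : Nat), l.length ≤ fuel →
      PySem.Chars.count.go p fuel l acc = acc + pvOcc p l := by
  intro fuel
  induction fuel with
  | zero =>
    intro l acc h
    have : l = [] := List.eq_nil_of_length_eq_zero (by omega)
    subst this
    simp [PySem.Chars.count.go, pvOcc]
  | succ n ih =>
    intro l acc h
    cases l with
    | nil => simp [PySem.Chars.count.go, pvOcc]
    | cons c t =>
      by_cases hpre : p.isPrefixOf (c :: t)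
      · rw [show PySem.Chars.count.go p (n + 1) (c :: t) acc
            = PySem.Chars.count.go p n ((c :: t).drop p.length) (acc + 1) by
              simp [PySem.Chars.count.go, hpre]]
        rw [ih _ _ (by simp at h ⊢; have := List.length_pos_iff.mpr hne; omega)]
        rw [pvOcc_skip hne hs (List.isPrefixOf_iff_prefix.mp hpre)]
        omega
      · rw [show PySem.Chars.count.go p (n + 1) (c :: t) acc
            = PySem.Chars.count.go p n t acc by simp [PySem.Chars.count.go, hpre]]
        rw [ih _ _ (by simp at h ⊢; omega), pvOcc_cons, if_neg hpre]
        omega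

theorem pv_count_eq {p : List Char} (hne : p ≠ []) (hs : pvNoSelf p = true) (l : List Char) :
    PySem.Chars.count l p = pvOcc p l := by
  unfold PySem.Chars.count
  rw [if_neg (by simpa using hne)]
  rw [pv_count_go hne hs _ _ _ le_rfl]
  simp

theorem pv_startswith_eq_isPrefixOf (l p : List Char) :
    PySem.Chars.startswith l p = p.isPrefixOf l := by
  rcases h : p.isPrefixOf l with _ | _
  · rw [Bool.eq_false_iff]
    intro hc
    have hpl : p <+: l := (PySem.Chars.startswith_iff _ _).mp hc
    rw [← List.isPrefixOf_iff_prefix] at hpl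
    simp [h] at hpl
  · exact (PySem.Chars.startswith_iff _ _).mpr (List.isPrefixOf_iff_prefix.mp h)

theorem pv_hit_sum (pats : List (List Char)) (hnd : pats.Nodup)
    (hP : ∀ p ∈ pats, ∀ q ∈ pats, p ≠ q → ¬ p <+: q) (l : List Char) :
    (if pvHit pats l then (1 : Int) else 0)
      = (pats.map (fun p => if p.isPrefixOf l then (1 : Int) else 0)).sum := by
  induction pats with
  | nil => simp [pvHit]
  | cons p ps ih =>
    have hnd' := (List.nodup_cons.mp hnd).2
    have hpm := (List.nodup_cons.mp hnd).1
    by_cases hpre : p.isPrefixOf l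
    · have hpreP : p <+: l := List.isPrefixOf_iff_prefix.mp hpre
      have hone : ∀ q ∈ ps, ¬ q <+: l := by
        intro q hq hql
        have hqp : q ≠ p := fun h => hpm (h ▸ hq)
        rcases le_total p.length q.length with hle | hle
        · exact hP p (List.mem_cons_self) q (List.mem_cons_of_mem _ hq) hqp.symm
            (List.prefix_of_prefix_length_le hpreP hql hle)
        · exact hP q (List.mem_cons_of_mem _ hq) p (List.mem_cons_self) hqp
            (List.prefix_of_prefix_length_le hql hpreP hle)
      have hsum : (ps.map (fun q => if q.isPrefixOf l then (1 : Int) else 0)).sum = 0 := by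
        apply List.sum_eq_zero
        intro x hx
        obtain ⟨q, hq, rfl⟩ := List.mem_map.mp hx
        simp [List.isPrefixOf_iff_prefix, hone q hq]
      simp [pvHit, pv_startswith_eq_isPrefixOf, List.isPrefixOf_iff_prefix, hpreP]
      apply List.sum_eq_zero
      intro x hx
      obtain ⟨q, hq, rfl⟩ := List.mem_map.mp hx
      simp [hone q hq]
    · have hpreP : ¬ p <+: l := by
        simpa [List.isPrefixOf_iff_prefix] using hpre
      have ih' := ih hnd'
        (fun a ha b hb => hP a (List.mem_cons_of_mem _ ha) b (List.mem_cons_of_mem _ hb))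
      simpa [pvHit, pv_startswith_eq_isPrefixOf, List.isPrefixOf_iff_prefix, hpreP] using ih'

theorem pvSum_nil (pats : List (List Char)) : pvSum pats [] = 0 := by
  unfold pvSum
  apply List.sum_eq_zero
  intro x hx
  obtain ⟨q, hq, rfl⟩ := List.mem_map.mp hx
  simp [pvOcc]

theorem pvSum_split (pats : List (List Char)) (c : Char) (t : List Char) :
    pvSum pats (c :: t)
      = (pats.map (fun p => if p.isPrefixOf (c :: t) then (1 : Int) else 0)).sum + pvSum pats t := by
  unfold pvSum
  induction pats with
  | nil => simp
  | cons p ps ih =>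
    simp only [List.map_cons, List.sum_cons]
    rw [ih, pvOcc_cons]
    rcases p.isPrefixOf (c :: t) with _ | _ <;> simp <;> ring

theorem pvSum_cons (pats : List (List Char)) (hnd : pats.Nodup)
    (hP : ∀ p ∈ pats, ∀ q ∈ pats, p ≠ q → ¬ p <+: q) (c : Char) (t : List Char) :
    pvSum pats (c :: t) = (if pvHit pats (c :: t) then 1 else 0) + pvSum pats t := by
  rw [pvSum_split, pv_hit_sum pats hnd hP]

theorem pv_dark_ok : pvDarkC.Nodup ∧ (∀ p ∈ pvDarkC, ∀ q ∈ pvDarkC, p ≠ q → ¬ p <+: q) := by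
  constructor <;> decide

theorem pv_gold_ok : pvGoldC.Nodup ∧ (∀ p ∈ pvGoldC, ∀ q ∈ pvGoldC, p ≠ q → ¬ p <+: q) := by
  constructor <;> decide

theorem pv_light_ok : pvLightC.Nodup ∧ (∀ p ∈ pvLightC, ∀ q ∈ pvLightC, p ≠ q → ¬ p <+: q) := by
  constructor <;> decide

theorem pvScan_spec : ∀ (l : List Char) (d g b : Int),
    pvScan l d g b = (d + pvSum pvDarkC l, g + pvSum pvGoldC l, b + pvSum pvLightC l) := by
  intro l
  induction l with
  | nil => intro d g b; simp [pvScan, pvSum_nil]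
  | cons c t ih =>
    intro d g b
    rw [pvScan, ih,
      pvSum_cons pvDarkC pv_dark_ok.1 pv_dark_ok.2 c t,
      pvSum_cons pvGoldC pv_gold_ok.1 pv_gold_ok.2 c t,
      pvSum_cons pvLightC pv_light_ok.1 pv_light_ok.2 c t]
    simp [Prod.ext_iff]
    refine ⟨by ring, by ring, by ring⟩

theorem pvSum_eq_counts (pats : List (List Char)) (l : List Char)
    (h : ∀ p ∈ pats, p ≠ [] ∧ pvNoSelf p = true) :
    pvSum pats l = (pats.map (fun p => (PySem.Chars.count l p : Int))).sum := by
  unfold pvSum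
  apply congrArg
  apply List.map_congr_left
  intro p hp
  rw [pv_count_eq (h p hp).1 (h p hp).2 l]

theorem pv_all_ok : ∀ p ∈ pvDarkC ++ pvGoldC ++ pvLightC, p ≠ [] ∧ pvNoSelf p = true := by
  decide

-- ---- A-side: evaluating the dict chain through getD / keys lemmas ----

theorem pv_contains_foldl_modify {l : List String} {d : PySem.Dict String Int} {k : String}
    (f : String → Int → Int) (hk : d.contains k = true) (k' : String) :
    (l.foldl (fun d p => d.modify k 0 (f p)) d).contains k' = d.contains k' := by
  induction l generalizing d with
  | nil => rfl
  | cons p ps ih =>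
    simp only [List.foldl_cons]
    rw [ih (by simp [PySem.Dict.contains_modify, hk]),
      PySem.Dict.contains_modify]
    rcases hkk : k' == k with _ | _
    · simp
    · simp [show k' = k from by simpa using hkk, hk]

theorem pv_keys_foldl_modify {l : List String} {d : PySem.Dict String Int} {k : String}
    (f : String → Int → Int) (hk : d.contains k = true) :
    (l.foldl (fun d p => d.modify k 0 (f p)) d).keys = d.keys := by
  induction l generalizing d with
  | nil => rfl
  | cons p ps ih =>
    simp only [List.foldl_cons]
    rw [ih (by simp [PySem.Dict.contains_modify, hk]),
      PySem.Dict.keys_modify, PySem.Dict.keys_insert_of_contains _ _ hk]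

theorem pv_getD_foldl_modify_self (l : List String) (d : PySem.Dict String Int) (k : String)
    (g : String → Int) :
    (l.foldl (fun d p => d.modify k 0 (fun v => v + g p)) d).getD k 0
      = d.getD k 0 + (l.map g).sum := by
  induction l generalizing d with
  | nil => simp
  | cons p ps ih =>
    simp only [List.foldl_cons, List.map_cons, List.sum_cons]
    rw [ih, PySem.Dict.getD_modify_self]
    ring

theorem pv_getD_foldl_modify_ne (l : List String) (d : PySem.Dict String Int) {k k' : String}
    (hne : k' ≠ k) (g : String → Int) :
    (l.foldl (fun d p => d.modify k 0 (fun v => v + g p)) d).getD k' 0 = d.getD k' 0 := by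
  induction l generalizing d with
  | nil => rfl
  | cons p ps ih =>
    simp only [List.foldl_cons]
    rw [ih, PySem.Dict.getD_modify_of_ne _ _ _ hne]

theorem pv_dark_ns : ∀ p ∈ pvDarkC, p ≠ [] ∧ pvNoSelf p = true := by decide
theorem pv_gold_ns : ∀ p ∈ pvGoldC, p ≠ [] ∧ pvNoSelf p = true := by decide
theorem pv_light_ns : ∀ p ∈ pvLightC, p ≠ [] ∧ pvNoSelf p = true := by decide

theorem pv_dark_sum (h : String) :
    (darkBluePatterns.map (fun p => (PySem.Str.count h p : Int))).sum = pvSum pvDarkC h.toList := by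
  rw [pvSum_eq_counts _ _ pv_dark_ns]
  simp only [darkBluePatterns, pvDarkC, List.map_cons, List.map_nil, PySem.Str.count_eq]

theorem pv_gold_sum (h : String) :
    (goldPatterns.map (fun p => (PySem.Str.count h p : Int))).sum = pvSum pvGoldC h.toList := by
  rw [pvSum_eq_counts _ _ pv_gold_ns]
  simp only [goldPatterns, pvGoldC, List.map_cons, List.map_nil, PySem.Str.count_eq]

theorem pv_light_sum (h : String) :
    (lightBluePatterns.map (fun p => (PySem.Str.count h p : Int))).sum = pvSum pvLightC h.toList := by
  rw [pvSum_eq_counts _ _ pv_light_ns]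
  simp only [lightBluePatterns, pvLightC, List.map_cons, List.map_nil, PySem.Str.count_eq]

theorem pv_main (html : String) : analyze_colors html = analyze_colors_alt html := by
  unfold analyze_colors analyze_colors_alt
  simp only []
  rw [pvScan_spec]
  set h := PySem.Str.lower html with hh
  set D0 : PySem.Dict String Int :=
    PySem.Dict.ofList [("dark_blue", 0), ("gold", 0), ("light_blue", 0), ("white", 0),
                       ("black", 0), ("gradient", 0), ("total", 0)] with hD0
  set d1 := darkBluePatterns.foldl
    (fun d p => d.modify "dark_blue" 0 (fun v => v + (PySem.Str.count h p : Int))) D0 with hd1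
  set d2 := goldPatterns.foldl
    (fun d p => d.modify "gold" 0 (fun v => v + (PySem.Str.count h p : Int))) d1 with hd2
  set d3 := lightBluePatterns.foldl
    (fun d p => d.modify "light_blue" 0 (fun v => v + (PySem.Str.count h p : Int))) d2 with hd3
  have hc1 : ∀ k', d1.contains k' = D0.contains k' := by
    intro k'; rw [hd1]; exact pv_contains_foldl_modify _ (by decide) k'
  have hc2 : ∀ k', d2.contains k' = D0.contains k' := by
    intro k'; rw [hd2, pv_contains_foldl_modify _ (by rw [hc1]; decide) k', hc1]
  have hc3 : ∀ k', d3.contains k' = D0.contains k' := by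
    intro k'; rw [hd3, pv_contains_foldl_modify _ (by rw [hc2]; decide) k', hc2]
  have hk3 : d3.keys = D0.keys := by
    rw [hd3, pv_keys_foldl_modify _ (by rw [hc2]; decide), hd2,
      pv_keys_foldl_modify _ (by rw [hc1]; decide), hd1,
      pv_keys_foldl_modify _ (by decide)]
  have hgetD : ∀ k', k' ≠ "dark_blue" → k' ≠ "gold" → k' ≠ "light_blue" →
      d3.getD k' 0 = D0.getD k' 0 := by
    intro k' h1 h2 h3
    rw [hd3, pv_getD_foldl_modify_ne _ _ h3, hd2, pv_getD_foldl_modify_ne _ _ h2, hd1,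
      pv_getD_foldl_modify_ne _ _ h1]
  have hdark : d3.getD "dark_blue" 0
      = (darkBluePatterns.map (fun p => (PySem.Str.count h p : Int))).sum := by
    rw [hd3, pv_getD_foldl_modify_ne _ _ (by decide), hd2,
      pv_getD_foldl_modify_ne _ _ (by decide), hd1, pv_getD_foldl_modify_self]
    rw [show D0.getD "dark_blue" 0 = 0 from by decide]
    ring
  have hgold : d3.getD "gold" 0
      = (goldPatterns.map (fun p => (PySem.Str.count h p : Int))).sum := by
    rw [hd3, pv_getD_foldl_modify_ne _ _ (by decide), hd2, pv_getD_foldl_modify_self, hd1,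
      pv_getD_foldl_modify_ne _ _ (by decide)]
    rw [show D0.getD "gold" 0 = 0 from by decide]
    ring
  have hlight : d3.getD "light_blue" 0
      = (lightBluePatterns.map (fun p => (PySem.Str.count h p : Int))).sum := by
    rw [hd3, pv_getD_foldl_modify_self, hd2, pv_getD_foldl_modify_ne _ _ (by decide), hd1,
      pv_getD_foldl_modify_ne _ _ (by decide)]
    rw [show D0.getD "light_blue" 0 = 0 from by decide]
    ring
  by_cases hg : PySem.Str.isIn "gradient" h = true
  · rw [if_pos hg, if_pos hg]
    have hkF : (((d3.insert "gradient" 1).insert "total" (PySem.Str.len html))).keys = D0.keys := by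
      rw [PySem.Dict.keys_insert_of_contains _ _
          (by rw [PySem.Dict.contains_insert]; simp [hc3]; decide),
        PySem.Dict.keys_insert_of_contains _ _ (by rw [hc3]; decide), hk3]
    rw [PySem.Dict.items_eq_map_keys _ (by rw [hkF]; decide) 0, hkF]
    rw [show D0.keys = ["dark_blue", "gold", "light_blue", "white", "black", "gradient", "total"]
      from by decide]
    simp only [List.map_cons, List.map_nil, PySem.Dict.getD_insert, List.cons.injEq,
      Prod.mk.injEq, true_and, and_true]
    refine ⟨?_, ?_, ?_, ?_, ?_, ?_, ?_⟩
    · rw [if_neg (by decide), if_neg (by decide), hdark, pv_dark_sum]; ring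
    · rw [if_neg (by decide), if_neg (by decide), hgold, pv_gold_sum]; ring
    · rw [if_neg (by decide), if_neg (by decide), hlight, pv_light_sum]; ring
    · rw [if_neg (by decide), if_neg (by decide),
        hgetD "white" (by decide) (by decide) (by decide), hD0]; decide
    · rw [if_neg (by decide), if_neg (by decide),
        hgetD "black" (by decide) (by decide) (by decide), hD0]; decide
    · simp
    · simp
  · rw [if_neg hg, if_neg hg]
    have hkF : ((d3.insert "total" (PySem.Str.len html))).keys = D0.keys := by
      rw [PySem.Dict.keys_insert_of_contains _ _ (by rw [hc3]; decide), hk3]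
    rw [PySem.Dict.items_eq_map_keys _ (by rw [hkF]; decide) 0, hkF]
    rw [show D0.keys = ["dark_blue", "gold", "light_blue", "white", "black", "gradient", "total"]
      from by decide]
    simp only [List.map_cons, List.map_nil, PySem.Dict.getD_insert, List.cons.injEq,
      Prod.mk.injEq, true_and, and_true]
    refine ⟨?_, ?_, ?_, ?_, ?_, ?_, ?_⟩
    · rw [if_neg (by decide), hdark, pv_dark_sum]; ring
    · rw [if_neg (by decide), hgold, pv_gold_sum]; ring
    · rw [if_neg (by decide), hlight, pv_light_sum]; ring
    · rw [if_neg (by decide), hgetD "white" (by decide) (by decide) (by decide), hD0]; decide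
    · rw [if_neg (by decide), hgetD "black" (by decide) (by decide) (by decide), hD0]; decide
    · rw [if_neg (by decide), hgetD "gradient" (by decide) (by decide) (by decide), hD0]; decide
    · simp

-- ===== VERDICT (by name: the statement is the Claim_ definition above) =====
theorem analyze_colors_spec : Claim_equal_analyze_colors := by
  intro html _
  unfold Spec_analyze_colors
  exact pv_main html
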